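-- pv_equiv track=rewrite | github.com/Rahandi/YoutubeDownload | main.py | humanize_time
-- ===== SOURCE A (Python) =====
-- def humanize_time(time):
--     array = []
--     while(time >= 60 and len(array) < 4):
--         array.append(time % 60)
--         time = int(time/60)
--     array.append(time)
--     while(len(array) < 4):
--         array.append(0)
--     return "{:02d}:{:02d}:{:02d}".format(array[2], array[1], array[0])
-- ===== SOURCE B (Python) =====
-- def humanize_time(time):
--     # closed-form: no loop; same output as the base-60 division loop version
--     if time < 60:
--         return "00:00:{:02d}".format(time)
--     return "{:02d}:{:02d}:{:02d}".format(time // 3600 % 60, time // 60 % 60, time % 60)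
-- ===== Notes on version B (the rewrite author's own statement) =====
-- stated objective: simpler
-- what changed: Replaced the base-60 division loop that builds a list (plus a padding loop and list indexing) with a two-line closed form: a direct small-input branch and one format call on the hours/minutes/seconds fields computed by floor division and modulus.
import Mathlib
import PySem

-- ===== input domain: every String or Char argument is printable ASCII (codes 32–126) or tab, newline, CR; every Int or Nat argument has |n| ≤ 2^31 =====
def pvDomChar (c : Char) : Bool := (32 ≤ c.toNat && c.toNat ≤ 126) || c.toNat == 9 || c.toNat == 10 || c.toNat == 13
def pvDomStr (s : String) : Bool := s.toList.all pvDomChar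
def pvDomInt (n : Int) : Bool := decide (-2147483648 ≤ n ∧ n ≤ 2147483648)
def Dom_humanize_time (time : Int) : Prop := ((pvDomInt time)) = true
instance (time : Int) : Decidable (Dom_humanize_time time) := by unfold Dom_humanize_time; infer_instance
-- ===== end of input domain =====

-- B replaces A's base-60 division/padding loops with a closed-form computation of the three fields (simpler).


-- shared helper: Python's "{:02d}".format(n).  Exact: zero-padding goes after the
-- sign in Python, but str(n) has length < 2 only for 0 ≤ n ≤ 9, where no sign occurs.
def fmt02 (n : Int) : String :=
  if PySem.Str.len (PySem.Int.toStr n) < 2 then "0" ++ PySem.Int.toStr n else PySem.Int.toStr n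

-- ===== PORT A =====
-- the first while loop; int(time/60) is ported as floor division, exact on every
-- reachable evaluation since the loop body only runs when time ≥ 60 (trunc = floor ≥ 0,
-- and float division is exact at integer boundaries for |time| ≤ 2^31)
def loopA (array : List Int) (time : Int) : List Int × Int :=
  if h : 60 ≤ time ∧ array.length < 4 then
    loopA (array ++ [PySem.Int.mod time 60]) (PySem.Int.floordiv time 60)
  else (array, time)
termination_by 4 - array.length
decreasing_by simp; omega

-- the second while loop (pad with zeros to length 4)
def padA (array : List Int) : List Int :=
  if h : array.length < 4 then padA (array ++ [0]) else array
termination_by 4 - array.length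
decreasing_by simp; omega

def humanize_time (time : Int) : String :=
  let p := loopA [] time
  let arr := padA (p.1 ++ [p.2])
  fmt02 ((PySem.List.pyGet? arr 2).getD 0) ++ ":" ++
    fmt02 ((PySem.List.pyGet? arr 1).getD 0) ++ ":" ++
    fmt02 ((PySem.List.pyGet? arr 0).getD 0)

-- ===== PORT B =====
def humanize_time_alt (time : Int) : String :=
  if time < 60 then "00:00:" ++ fmt02 time
  else
    fmt02 (PySem.Int.mod (PySem.Int.floordiv time 3600) 60) ++ ":" ++
      fmt02 (PySem.Int.mod (PySem.Int.floordiv time 60) 60) ++ ":" ++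
      fmt02 (PySem.Int.mod time 60)

-- ===== PRECONDITION & SPEC =====
def Spec_humanize_time (time : Int) (out : String) : Prop := out = humanize_time_alt time
instance (time : Int) (out : String) : Decidable (Spec_humanize_time time out) := by unfold Spec_humanize_time; infer_instance

-- ===== CLAIM (what is proved, stated in full; the proofs are below) =====
def Claim_equal_humanize_time : Prop := ∀ (time : Int), Dom_humanize_time time → Spec_humanize_time time (humanize_time time)

-- ===== LEMMAS AND PROOFS =====

theorem fmt02_zero : fmt02 0 = "0" ++ "0" := by decide

theorem loopA_step (arr : List Int) (t : Int) (h1 : 60 ≤ t) (h2 : arr.length < 4) :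
    loopA arr t = loopA (arr ++ [PySem.Int.mod t 60]) (PySem.Int.floordiv t 60) := by
  rw [loopA.eq_def, dif_pos ⟨h1, h2⟩]

theorem loopA_stop (arr : List Int) (t : Int) (h : ¬(60 ≤ t ∧ arr.length < 4)) :
    loopA arr t = (arr, t) := by
  rw [loopA.eq_def, dif_neg h]

theorem padA_step (arr : List Int) (h : arr.length < 4) : padA arr = padA (arr ++ [0]) := by
  rw [padA.eq_def, dif_pos h]

theorem padA_stop (arr : List Int) (h : ¬ arr.length < 4) : padA arr = arr := by
  rw [padA.eq_def, dif_neg h]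

theorem case_small (t : Int) (h : t < 60) : humanize_time t = "00:00:" ++ fmt02 t := by
  simp only [humanize_time]
  rw [loopA_stop _ _ (by omega)]
  rw [padA_step _ (by simp), padA_step _ (by simp), padA_step _ (by simp),
      padA_stop _ (by simp)]
  simp [PySem.List.pyGet?, PySem.List.pyIdx?]
  rw [fmt02_zero, show ("00:00:" : String) = ("0" ++ "0") ++ ":" ++ ("0" ++ "0") ++ ":" from by decide]

set_option maxHeartbeats 1000000 in
theorem case_big (t : Int) (h60 : 60 ≤ t) (hub : t ≤ 2147483648) :
    humanize_time t =
      fmt02 (PySem.Int.mod (PySem.Int.floordiv t 3600) 60) ++ ":" ++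
        fmt02 (PySem.Int.mod (PySem.Int.floordiv t 60) 60) ++ ":" ++
        fmt02 (PySem.Int.mod t 60) := by
  have h0 : (0 : Int) < 60 := by norm_num
  have h0' : (0 : Int) < 3600 := by norm_num
  have ed : ∀ a : Int, PySem.Int.floordiv a 60 = a / 60 :=
    fun a => PySem.Int.floordiv_eq_ediv_of_pos h0
  have em : ∀ a : Int, PySem.Int.mod a 60 = a % 60 :=
    fun a => PySem.Int.mod_eq_emod_of_pos h0
  simp only [humanize_time, ed, em, PySem.Int.floordiv_eq_ediv_of_pos h0']
  by_cases hA : t < 3600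
  · rw [loopA_step _ _ (by omega) (by simp), loopA_stop _ _ (by simp only [ed]; omega)]
    simp only [ed, em]
    rw [padA_step _ (by simp), padA_step _ (by simp), padA_stop _ (by simp)]
    simp [PySem.List.pyGet?, PySem.List.pyIdx?]
    rw [show t / 3600 % 60 = 0 from by omega, show t / 60 % 60 = t / 60 from by omega]
  · by_cases hB : t < 216000
    · rw [loopA_step _ _ (by omega) (by simp),
          loopA_step _ _ (by simp only [ed]; omega) (by simp),
          loopA_stop _ _ (by simp only [ed]; omega)]
      simp only [ed, em]
      rw [padA_step _ (by simp), padA_stop _ (by simp)]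
      simp [PySem.List.pyGet?, PySem.List.pyIdx?]
      rw [show t / 3600 % 60 = t / 60 / 60 from by omega]
    · by_cases hC : t < 12960000
      · rw [loopA_step _ _ (by omega) (by simp),
            loopA_step _ _ (by simp only [ed]; omega) (by simp),
            loopA_step _ _ (by simp only [ed]; omega) (by simp),
            loopA_stop _ _ (by simp only [ed]; omega)]
        simp only [ed, em]
        rw [padA_stop _ (by simp)]
        simp [PySem.List.pyGet?, PySem.List.pyIdx?]
        rw [show t / 3600 % 60 = t / 60 / 60 % 60 from by omega]
      · rw [loopA_step _ _ (by omega) (by simp),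
            loopA_step _ _ (by simp only [ed]; omega) (by simp),
            loopA_step _ _ (by simp only [ed]; omega) (by simp),
            loopA_step _ _ (by simp only [ed]; omega) (by simp),
            loopA_stop _ _ (by simp)]
        simp only [ed, em]
        rw [padA_stop _ (by simp)]
        simp [PySem.List.pyGet?, PySem.List.pyIdx?]
        rw [show t / 3600 % 60 = t / 60 / 60 % 60 from by omega]

-- ===== VERDICT (by name: the statement is the Claim_ definition above) =====
theorem humanize_time_spec : Claim_equal_humanize_time := by
  intro t hdom
  unfold Spec_humanize_time humanize_time_alt
  by_cases h : t < 60
  · rw [if_pos h, case_small t h]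
  · have hub : t ≤ 2147483648 := by
      simp [Dom_humanize_time, pvDomInt] at hdom; omega
    rw [if_neg h, case_big t (by omega) hub]
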